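-- pv_equiv track=rewrite | github.com/rlhjansen/Paper_netlists | plot_order.py | paths_to_buildcomp
-- ===== SOURCE A (Python) =====
-- def paths_to_buildcomp(paths):
--     """ Splits tuple of all paths into a list of parts, which consist of all
--
--     Wirepaths up untill i for index i.
--     e.g. (with P1 and P2 both having 3 elements):
--     (P1, P2,) --> [((P11),) , ((P11, P12),) , ((P11, P12, P13),) ,
--         ((P11, P12, P13), (P21),) , ((P11, P12, P13), (P21, P22),) ,
--         ((P11, P12, P13), (P21, P22, P23),)]
--
--     :param paths: Tuple of paths like (P1, P2,)
--     :return: List of parts like above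
--     """
--     totlen = sum([len(elem) for elem in paths])
--     tot_path = []
--     for i in range(totlen):
--         leftover_i = i
--         temp_path = []
--         for path in paths:
--             if leftover_i > len(path):
--                 temp_path.append(path)
--                 leftover_i -= len(path)
--             else:
--                 temp_path.append(path[:leftover_i])
--                 break
--         tot_path.append(temp_path)
--     return tot_path
-- ===== SOURCE B (Python) =====
-- def paths_to_buildcomp(paths):
--     result = []
--     completed = []
--     for idx, path in enumerate(paths):
--         start = 0 if idx == 0 else 1
--         for j in range(start, len(path) + 1):
--             result.append(completed + [path[:j]])
--         completed.append(path)
--     return result[:-1]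
-- ===== Notes on version B (the rewrite author's own statement) =====
-- stated objective: alternative
-- what changed: Replaces A's outer loop over every global index i with an inner re-walk of the path list (subtracting leftover lengths each time) by a single incremental pass: a growing 'completed' accumulator plus a prefix-length loop per path, emitting each part directly and dropping the trailing full entry; both remain output-bound since each emitted part is copied.
import Mathlib
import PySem

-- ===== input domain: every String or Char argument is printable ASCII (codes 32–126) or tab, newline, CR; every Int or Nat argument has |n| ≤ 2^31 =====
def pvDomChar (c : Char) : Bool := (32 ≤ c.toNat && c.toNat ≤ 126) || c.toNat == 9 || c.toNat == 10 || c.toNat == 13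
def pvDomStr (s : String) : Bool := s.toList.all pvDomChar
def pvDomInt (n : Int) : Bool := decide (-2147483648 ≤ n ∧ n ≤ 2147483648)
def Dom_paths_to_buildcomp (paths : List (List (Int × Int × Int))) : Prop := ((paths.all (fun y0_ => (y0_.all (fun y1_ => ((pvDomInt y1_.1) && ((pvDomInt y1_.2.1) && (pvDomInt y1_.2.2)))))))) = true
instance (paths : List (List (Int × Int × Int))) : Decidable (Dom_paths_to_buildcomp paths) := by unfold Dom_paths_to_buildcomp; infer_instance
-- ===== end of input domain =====

-- B replaces A's per-index re-walk (with leftover subtraction) by one incremental pass: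
-- a growing 'completed' accumulator plus a prefix-length loop per path (objective: alternative decomposition).


-- ===== PORT A =====
-- inner 'for path in paths' loop with break, carrying leftover_i and building temp_path
def pvInnerA (leftover : Int) : List (List (Int × Int × Int)) → List (List (Int × Int × Int))
  | [] => []
  | path :: rest =>
      if leftover > (path.length : Int) then
        path :: pvInnerA (leftover - (path.length : Int)) rest
      else
        [PySem.List.slice path none (some leftover)]

def paths_to_buildcomp (paths : List (List (Int × Int × Int))) : List (List (List (Int × Int × Int))) :=
  let totlen : Int := (paths.map (fun elem => (elem.length : Int))).sum
  (PySem.List.pyRange 0 totlen 1).foldl (fun tot_path i => tot_path ++ [pvInnerA i paths]) []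

-- ===== PORT B =====
-- state: (result, completed, idx); per path, emit completed ++ [path[:j]] for j in range(start, len+1)
def pvStepB (st : List (List (List (Int × Int × Int))) × List (List (Int × Int × Int)) × Nat)
    (path : List (Int × Int × Int)) :
    List (List (List (Int × Int × Int))) × List (List (Int × Int × Int)) × Nat :=
  let result := st.1
  let completed := st.2.1
  let idx := st.2.2
  let start : Int := if idx = 0 then 0 else 1
  let result := (PySem.List.pyRange start ((path.length : Int) + 1) 1).foldl
      (fun r j => r ++ [completed ++ [PySem.List.slice path none (some j)]]) result
  (result, completed ++ [path], idx + 1)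

def paths_to_buildcomp_alt (paths : List (List (Int × Int × Int))) : List (List (List (Int × Int × Int))) :=
  let st := paths.foldl pvStepB ([], [], 0)
  PySem.List.slice st.1 none (some (-1))

-- ===== PRECONDITION & SPEC =====
def Spec_paths_to_buildcomp (paths : List (List (Int × Int × Int))) (out : List (List (List (Int × Int × Int)))) : Prop := out = paths_to_buildcomp_alt paths
instance (paths : List (List (Int × Int × Int))) (out : List (List (List (Int × Int × Int)))) : Decidable (Spec_paths_to_buildcomp paths out) := by unfold Spec_paths_to_buildcomp; infer_instance

-- ===== CLAIM (what is proved, stated in full; the proofs are below) =====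
def Claim_equal_paths_to_buildcomp : Prop := ∀ (paths : List (List (Int × Int × Int))), Dom_paths_to_buildcomp paths → Spec_paths_to_buildcomp paths (paths_to_buildcomp paths)

-- ===== LEMMAS AND PROOFS =====

-- Nat-level model of A's inner walk
def pvWalk (i : Nat) : List (List (Int × Int × Int)) → List (List (Int × Int × Int))
  | [] => []
  | p :: rest => if p.length < i then p :: pvWalk (i - p.length) rest else [p.take i]

-- total number of elements
def pvTot (paths : List (List (Int × Int × Int))) : Nat := (paths.map List.length).sum

lemma pvInnerA_eq_walk (paths : List (List (Int × Int × Int))) (i : Nat) :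
    pvInnerA (i : Int) paths = pvWalk i paths := by
  induction paths generalizing i with
  | nil => simp [pvInnerA, pvWalk]
  | cons p rest ih =>
      simp only [pvInnerA, pvWalk]
      by_cases h : p.length < i
      · rw [if_pos (by exact_mod_cast h), if_pos h]
        have hc : (i : Int) - (p.length : Int) = ((i - p.length : Nat) : Int) := by omega
        rw [hc, ih]
      · rw [if_neg (by exact_mod_cast h), if_neg h, PySem.List.slice_to_natCast]

lemma pvA_eq_map (paths : List (List (Int × Int × Int))) :
    paths_to_buildcomp paths = (List.range (pvTot paths)).map (fun i => pvWalk i paths) := by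
  have htot : (paths.map (fun elem => (elem.length : Int))).sum = ((pvTot paths : Nat) : Int) := by
    unfold pvTot
    induction paths with
    | nil => simp
    | cons p rest ih => simp only [List.map_cons, List.sum_cons, ih]; push_cast; ring
  show (PySem.List.pyRange 0 ((paths.map (fun elem => (elem.length : Int))).sum) 1).foldl
      (fun tot_path i => tot_path ++ [pvInnerA i paths]) [] = _
  rw [htot, PySem.List.pyRange_zero_nat, PySem.List.foldl_append_singleton_eq_map, List.nil_append,
    List.map_map]
  apply List.map_congr_left
  intro i _
  exact pvInnerA_eq_walk paths i

-- spec of B's per-path emissions for the non-first paths, relative to empty 'completed'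
def pvRspec : List (List (Int × Int × Int)) → List (List (List (Int × Int × Int)))
  | [] => []
  | q :: r => ((List.range q.length).map (fun k => [q.take (k + 1)])) ++ (pvRspec r).map (q :: ·)

lemma pvWalk_le (p : List (Int × Int × Int)) (rest : List (List (Int × Int × Int))) (i : Nat)
    (h : i ≤ p.length) : pvWalk i (p :: rest) = [p.take i] := by
  simp [pvWalk, Nat.not_lt.mpr h]

lemma pvWalk_gt (p : List (Int × Int × Int)) (rest : List (List (Int × Int × Int))) (k : Nat) :
    pvWalk (p.length + k + 1) (p :: rest) = p :: pvWalk (k + 1) rest := by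
  simp only [pvWalk]
  rw [if_pos (by omega)]
  have hc : p.length + k + 1 - p.length = k + 1 := by omega
  rw [hc]

lemma pvRspec_eq_map (rest : List (List (Int × Int × Int))) :
    pvRspec rest = (List.range (pvTot rest)).map (fun k => pvWalk (k + 1) rest) := by
  induction rest with
  | nil => simp [pvRspec, pvTot]
  | cons q r ih =>
      have htot : pvTot (q :: r) = q.length + pvTot r := by simp [pvTot]
      rw [pvRspec, htot, List.range_add, List.map_append, ih, List.map_map, List.map_map]
      congr 1
      · apply List.map_congr_left
        intro k hk
        rw [List.mem_range] at hk
        rw [pvWalk_le q r (k + 1) (by omega)]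
      · apply List.map_congr_left
        intro k _
        simp only [Function.comp_apply]
        exact (pvWalk_gt q r k).symm

lemma pyRange_one_len (n : Nat) :
    PySem.List.pyRange 1 ((n : Int) + 1) 1 = (List.range n).map (fun k : Nat => ((k : Int) + 1)) := by
  rw [PySem.List.pyRange_one]
  have hc : (((n : Int) + 1) - 1).toNat = n := by omega
  rw [hc]
  apply List.map_congr_left
  intro k _
  omega

-- the non-first-path emissions equal pvRspec shifted by 'completed'
lemma pvFoldB_tail (rest : List (List (Int × Int × Int)))
    (result : List (List (List (Int × Int × Int)))) (completed : List (List (Int × Int × Int))) (n : Nat) :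
    (rest.foldl pvStepB (result, completed, n + 1)).1
      = result ++ (pvRspec rest).map (completed ++ ·) := by
  induction rest generalizing result completed n with
  | nil => simp [pvRspec]
  | cons q r ih =>
      rw [List.foldl_cons]
      have hstep : pvStepB (result, completed, n + 1) q
          = ((PySem.List.pyRange 1 ((q.length : Int) + 1) 1).foldl
              (fun rs j => rs ++ [completed ++ [PySem.List.slice q none (some j)]]) result,
             completed ++ [q], n + 2) := rfl
      rw [hstep, PySem.List.foldl_append_singleton_eq_map, pyRange_one_len, List.map_map]
      rw [show n + 2 = (n + 1) + 1 by omega, ih, pvRspec, List.map_append, List.map_map,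
        List.map_map, List.append_assoc]
      congr 2
      · apply List.map_congr_left
        intro k _
        simp only [Function.comp_apply]
        have hc : ((k : Int) + 1) = (((k + 1 : Nat)) : Int) := by push_cast; ring
        rw [hc, PySem.List.slice_to_natCast]
      · apply List.map_congr_left
        intro x _
        simp only [Function.comp_apply, List.append_assoc, List.singleton_append]

lemma pvB_char (p : List (Int × Int × Int)) (rest : List (List (Int × Int × Int))) :
    paths_to_buildcomp_alt (p :: rest)
      = (((List.range (p.length + 1)).map (fun j => [p.take j]))
          ++ (pvRspec rest).map (p :: ·)).dropLast := by
  have hstep : (p :: rest).foldl pvStepB ([], [], 0)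
      = rest.foldl pvStepB
          ((PySem.List.pyRange 0 ((p.length : Int) + 1) 1).foldl
            (fun rs j => rs ++ [[] ++ [PySem.List.slice p none (some j)]]) [],
           [p], 1) := rfl
  have hfirst : (PySem.List.pyRange 0 ((p.length : Int) + 1) 1).foldl
      (fun rs j => rs ++ [[] ++ [PySem.List.slice p none (some j)]]) []
      = (List.range (p.length + 1)).map (fun j => [p.take j]) := by
    rw [PySem.List.foldl_append_singleton_eq_map, List.nil_append]
    have hc : ((p.length : Int) + 1) = (((p.length + 1 : Nat)) : Int) := by push_cast; ring
    rw [hc, PySem.List.pyRange_zero_nat, List.map_map]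
    apply List.map_congr_left
    intro j _
    simp only [Function.comp_apply, List.nil_append, PySem.List.slice_to_natCast]
  show PySem.List.slice ((p :: rest).foldl pvStepB ([], [], 0)).1 none (some (-1)) = _
  rw [hstep, hfirst]
  have h1 : (1 : Nat) = 0 + 1 := rfl
  rw [h1, pvFoldB_tail rest _ [p] 0, PySem.List.slice_to_neg_one]
  simp only [List.singleton_append]

lemma pvDropLast_map_range {α : Type} (f : Nat → α) (n : Nat) :
    ((List.range (n + 1)).map f).dropLast = (List.range n).map f := by
  rw [List.range_succ, List.map_append]
  simp

lemma pvMain (paths : List (List (Int × Int × Int))) :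
    paths_to_buildcomp paths = paths_to_buildcomp_alt paths := by
  cases paths with
  | nil => decide
  | cons p rest =>
      rw [pvA_eq_map, pvB_char, pvRspec_eq_map]
      have htot : pvTot (p :: rest) = p.length + pvTot rest := by simp [pvTot]
      rw [htot]
      cases htr : pvTot rest with
      | zero =>
          simp only [List.range_zero, List.map_nil, List.append_nil, Nat.add_zero]
          rw [pvDropLast_map_range]
          apply List.map_congr_left
          intro i hi
          rw [List.mem_range] at hi
          rw [pvWalk_le p rest i (by omega)]
      | succ s =>
          rw [List.map_map, List.dropLast_append, if_neg (by simp)]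
          rw [pvDropLast_map_range]
          have hsplit : p.length + (s + 1) = (p.length + 1) + s := by omega
          rw [hsplit, List.range_add, List.map_append, List.map_map]
          congr 1
          · apply List.map_congr_left
            intro i hi
            rw [List.mem_range] at hi
            rw [pvWalk_le p rest i (by omega)]
          · apply List.map_congr_left
            intro k _
            simp only [Function.comp_apply]
            have hc : p.length + 1 + k = p.length + k + 1 := by omega
            rw [hc, pvWalk_gt p rest k]

-- ===== VERDICT (by name: the statement is the Claim_ definition above) =====
theorem paths_to_buildcomp_spec : Claim_equal_paths_to_buildcomp := by
  intro paths _
  unfold Spec_paths_to_buildcomp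
  exact pvMain paths
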